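-- pv_equiv track=rewrite | github.com/Nik-BB/Understanding_DRP_models | BinaryET_and_BinaryCB/source_code/result_analysis_nest.py | find_overlapping_cls
-- ===== SOURCE A (Python) =====
-- def find_overlapping_cls(drug_to_cl_dict, drugs_to_ignore=['Tretinoin']):
--     '''finds cls in all drugs ignoring drugs_to_ignore'''
--     drugs = list(drug_to_cl_dict.keys())
--     for d in drugs:
--         num_cls = len(drug_to_cl_dict[d])
--         if num_cls < 500 and d not in drugs_to_ignore:
--             raise Exception(f'{d} only has {num_cls} cls ')
--     overlapping = set(drug_to_cl_dict[drugs[0]])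
--     for d in drugs[1 : ]:
--         if d in drugs_to_ignore:
--             continue
--         cells = drug_to_cl_dict[d]
--         overlapping = overlapping.intersection(cells)
--
--     return overlapping
-- ===== SOURCE B (Python) =====
-- def find_overlapping_cls(drug_to_cl_dict, drugs_to_ignore=['Tretinoin']):
--     '''finds cls in all drugs ignoring drugs_to_ignore'''
--     for d, cells in drug_to_cl_dict.items():
--         if len(cells) < 500 and d not in drugs_to_ignore:
--             raise Exception(f'{d} only has {len(cells)} cls ')
--     drugs = list(drug_to_cl_dict)
--     cell_sets = [set(drug_to_cl_dict[d]) for d in drugs[1:]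
--                  if d not in drugs_to_ignore]
--     result = set()
--     for c in drug_to_cl_dict[drugs[0]]:
--         if all(c in s for s in cell_sets):
--             result.add(c)
--     return result
-- ===== Notes on version B (the rewrite author's own statement) =====
-- stated objective: alternative
-- what changed: Instead of folding a running set intersection over the later drugs, B precomputes their cell sets once and does a single membership-filter pass over the first drug's cells, adding each cell that occurs in every required set.
import Mathlib
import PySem

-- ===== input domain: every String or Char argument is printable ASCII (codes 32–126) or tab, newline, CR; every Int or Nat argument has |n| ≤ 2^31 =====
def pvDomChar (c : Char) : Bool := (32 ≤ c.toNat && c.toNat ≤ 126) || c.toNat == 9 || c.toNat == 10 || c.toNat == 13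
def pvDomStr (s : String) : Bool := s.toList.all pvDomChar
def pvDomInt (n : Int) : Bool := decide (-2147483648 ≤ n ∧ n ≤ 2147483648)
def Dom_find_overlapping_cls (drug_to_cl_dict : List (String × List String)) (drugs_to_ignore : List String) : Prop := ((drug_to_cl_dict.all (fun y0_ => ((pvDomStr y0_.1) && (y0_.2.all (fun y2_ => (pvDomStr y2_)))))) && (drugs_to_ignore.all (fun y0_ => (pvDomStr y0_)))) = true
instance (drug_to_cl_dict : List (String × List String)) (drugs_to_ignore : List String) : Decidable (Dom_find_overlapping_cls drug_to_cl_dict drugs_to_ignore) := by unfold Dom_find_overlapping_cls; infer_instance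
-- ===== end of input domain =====

-- B replaces A's running set intersection by a single membership-filter pass over the first drug's
-- cells against precomputed cell sets of the later required drugs; same cost, alternative algorithm.
-- Both return a Python set; equality below is on the ports' representative lists, which agree.

-- ===== PORT A =====
def find_overlapping_cls (drug_to_cl_dict : List (String × List String)) (drugs_to_ignore : List String) : List String :=
  -- dict = drug_to_cl_dict as a Python dict, drugs = list(dict.keys())
  -- validation loop: its only effect is a raise, excluded by Pre_; ported as a guard returning []
  if (PySem.Dict.ofList drug_to_cl_dict).keys.any (fun d =>
      decide (((PySem.Dict.ofList drug_to_cl_dict).getD d []).length < 500) && !drugs_to_ignore.contains d) then []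
  else
    match (PySem.Dict.ofList drug_to_cl_dict).keys with
    | [] => []  -- drugs[0] would raise IndexError; excluded by Pre_
    | d0 :: rest =>
      rest.foldl (fun overlapping d =>
          if drugs_to_ignore.contains d then overlapping
          else PySem.Set.inter overlapping ((PySem.Dict.ofList drug_to_cl_dict).getD d []))
        (PySem.Set.ofList ((PySem.Dict.ofList drug_to_cl_dict).getD d0 []))

-- ===== PORT B =====
-- B-side helper: the validation loop over dict items (raise ported as a Bool; excluded by Pre_)
def pvAnyTooSmall : List (String × List String) → List String → Bool
  | [], _ => false
  | (d, cells) :: rest, ig =>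
      (decide (cells.length < 500) && !ig.contains d) || pvAnyTooSmall rest ig

-- B-side helper: all(c in s for s in cell_sets)
def pvInAllSets (cellSets : List (PySem.Set String)) (c : String) : Bool :=
  cellSets.all (fun s => PySem.Set.contains s c)

-- B-side helper: the result-building loop (result.add(c) for passing cells)
def pvCollect (cells : List String) (cellSets : List (PySem.Set String)) : PySem.Set String :=
  cells.foldl (fun res c => if pvInAllSets cellSets c then PySem.Set.add res c else res)
    PySem.Set.empty

def find_overlapping_cls_alt (drug_to_cl_dict : List (String × List String)) (drugs_to_ignore : List String) : List String :=
  let dd := PySem.Dict.ofList drug_to_cl_dict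
  if pvAnyTooSmall dd.items drugs_to_ignore then []
  else
    match dd.keys with
    | [] => []  -- drugs[0] would raise IndexError; excluded by Pre_
    | first :: later =>
      pvCollect (dd.getD first [])
        ((later.filter (fun d => !drugs_to_ignore.contains d)).map
          (fun d => PySem.Set.ofList (dd.getD d [])))

-- ===== PRECONDITION & SPEC =====
-- Pre_ excludes exactly the inputs on which the Python A raises: the empty dict (IndexError on drugs[0])
-- and any non-ignored drug with fewer than 500 cell lines (explicit raise).
def Pre_find_overlapping_cls (drug_to_cl_dict : List (String × List String)) (drugs_to_ignore : List String) : Prop :=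
  drug_to_cl_dict ≠ [] ∧
  ∀ p ∈ (PySem.Dict.ofList drug_to_cl_dict).items, 500 ≤ p.2.length ∨ p.1 ∈ drugs_to_ignore
instance (drug_to_cl_dict : List (String × List String)) (drugs_to_ignore : List String) : Decidable (Pre_find_overlapping_cls drug_to_cl_dict drugs_to_ignore) := by unfold Pre_find_overlapping_cls; infer_instance

def pvWitness_find_overlapping_cls : (List (String × List String)) × List String := ([("A", ["c1"])], ["A"])

def Spec_find_overlapping_cls (drug_to_cl_dict : List (String × List String)) (drugs_to_ignore : List String) (out : List String) : Prop := out = find_overlapping_cls_alt drug_to_cl_dict drugs_to_ignore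
instance (drug_to_cl_dict : List (String × List String)) (drugs_to_ignore : List String) (out : List String) : Decidable (Spec_find_overlapping_cls drug_to_cl_dict drugs_to_ignore out) := by unfold Spec_find_overlapping_cls; infer_instance

-- ===== CLAIM (what is proved, stated in full; the proofs are below) =====
def Claim_equal_find_overlapping_cls : Prop := ∀ (drug_to_cl_dict : List (String × List String)) (drugs_to_ignore : List String), Dom_find_overlapping_cls drug_to_cl_dict drugs_to_ignore → Pre_find_overlapping_cls drug_to_cl_dict drugs_to_ignore → Spec_find_overlapping_cls drug_to_cl_dict drugs_to_ignore (find_overlapping_cls drug_to_cl_dict drugs_to_ignore)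

-- ===== LEMMAS AND PROOFS =====

-- A's loop with the ignore-branch is the intersection fold over the filtered drug list.
theorem foldl_ignore_eq_filter (ig : List String) (getd : String → List String)
    (rest : List String) (s : List String) :
    rest.foldl (fun ov d => if ig.contains d then ov else PySem.Set.inter ov (getd d)) s
      = (rest.filter (fun d => !ig.contains d)).foldl (fun ov d => PySem.Set.inter ov (getd d)) s := by
  induction rest generalizing s with
  | nil => rfl
  | cons d rest ih =>
    simp only [List.foldl_cons, List.filter_cons]
    cases h : ig.contains d
    · simpa using ih (PySem.Set.inter s (getd d))
    · simpa using ih s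

-- An intersection fold is a single filter by membership in every set.
theorem foldl_inter_eq_filter (getd : String → List String) (ds : List String) (s : List String) :
    ds.foldl (fun ov d => PySem.Set.inter ov (getd d)) s
      = s.filter (fun c => ds.all (fun d => (getd d).contains c)) := by
  induction ds generalizing s with
  | nil => simp
  | cons d ds ih =>
    rw [List.foldl_cons, ih, PySem.Set.inter, List.filter_filter]
    exact List.filter_congr (fun c _ => by
      simp only [PySem.Set.contains_eq_listContains, List.all_cons]
      cases (getd d).contains c <;> simp)

-- B's result loop adds exactly the passing cells, i.e. is the Set.update by the filtered cells.
theorem collect_eq_update (p : String → Bool) (cells : List String) (s : PySem.Set String) :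
    cells.foldl (fun res c => if p c then PySem.Set.add res c else res) s
      = PySem.Set.update s (cells.filter p) := by
  induction cells generalizing s with
  | nil => rfl
  | cons c cells ih =>
    simp only [List.foldl_cons, List.filter_cons]
    cases h : p c
    · simpa using ih s
    · simpa [PySem.Set.update] using ih (PySem.Set.add s c)

-- filter commutes with Set.update (first-occurrence dedup).
theorem filter_set_update (p : String → Bool) (l : List String) (s : List String) :
    (PySem.Set.update s l).filter p = PySem.Set.update (s.filter p) (l.filter p) := by
  induction l generalizing s with
  | nil => rfl
  | cons c l ih =>
    show (PySem.Set.update (PySem.Set.add s c) l).filter p = _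
    rw [ih]
    have hadd : (PySem.Set.add s c).filter p
        = if p c then PySem.Set.add (s.filter p) c else s.filter p := by
      unfold PySem.Set.add
      by_cases hc : c ∈ s
      · have hcf : p c = true → c ∈ s.filter p := fun h => List.mem_filter.2 ⟨hc, h⟩
        cases hp : p c
        · simp [hc]
        · simp [hc, hcf hp]
      · have hcf : c ∉ s.filter p := fun h => hc (List.mem_of_mem_filter h)
        cases hp : p c
        · simp [hc, hp]
        · simp [hc, hcf, hp]
    simp only [List.filter_cons, hadd]
    cases hp : p c
    · simp
    · simp [PySem.Set.update]

-- B's guard is the obvious any over the items.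
theorem pvAnyTooSmall_eq_any (items : List (String × List String)) (ig : List String) :
    pvAnyTooSmall items ig
      = items.any (fun p => decide (p.2.length < 500) && !ig.contains p.1) := by
  induction items with
  | nil => rfl
  | cons q rest ih => simp [pvAnyTooSmall, ih]

theorem keys_ofList_eq (dl : List (String × List String)) :
    (PySem.Dict.ofList dl).keys = PySem.Set.ofList (dl.map Prod.fst) := by
  have h := PySem.Dict.keys_foldl_insert_key dl Prod.fst (fun _ p => p.2) PySem.Dict.empty
  simpa [PySem.Dict.ofList, PySem.Dict.update, PySem.Set.update, PySem.Set.ofList,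
    PySem.Dict.keys, PySem.Dict.empty] using h

-- ===== VERDICT (by name: the statement is the Claim_ definition above) =====
theorem find_overlapping_cls_spec : Claim_equal_find_overlapping_cls := by
  intro dl ig _ hpre
  obtain ⟨hne, hbig⟩ := hpre
  unfold Spec_find_overlapping_cls find_overlapping_cls find_overlapping_cls_alt
  have hnd : (PySem.Dict.ofList dl).keys.Nodup := PySem.Dict.nodup_keys_ofList dl
  have hguardA : ((PySem.Dict.ofList dl).keys.any
      (fun d => decide (((PySem.Dict.ofList dl).getD d []).length < 500) && !ig.contains d)) = false := by
    rw [List.any_eq_false]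
    intro d hd
    obtain ⟨v, hv⟩ : ∃ v, (d, v) ∈ (PySem.Dict.ofList dl).items := by
      simpa [PySem.Dict.keys, List.mem_map, Prod.ext_iff] using hd
    have hget := PySem.Dict.getD_of_mem_items (PySem.Dict.ofList dl) hv hnd []
    rcases hbig (d, v) hv with h5 | hig
    · simp [hget, Nat.not_lt.2 h5]
    · simp [hget, hig]
  have hguardB : pvAnyTooSmall (PySem.Dict.ofList dl).items ig = false := by
    rw [pvAnyTooSmall_eq_any, List.any_eq_false]
    intro p hp
    rcases hbig p hp with h5 | hig
    · simp [Nat.not_lt.2 h5]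
    · simp [hig]
  have hkeys : (PySem.Dict.ofList dl).keys ≠ [] := by
    rw [keys_ofList_eq]
    obtain ⟨p, dl', rfl⟩ := List.exists_cons_of_ne_nil hne
    intro h
    have hm : p.1 ∈ PySem.Set.ofList ((p :: dl').map Prod.fst) :=
      (PySem.Set.mem_ofList _ _).2 (by simp)
    rw [h] at hm
    exact absurd hm (by simp)
  obtain ⟨d0, rest, hk⟩ : ∃ d0 rest, (PySem.Dict.ofList dl).keys = d0 :: rest := by
    cases h : (PySem.Dict.ofList dl).keys with
    | nil => exact absurd h hkeys
    | cons a b => exact ⟨a, b, rfl⟩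
  simp only [hguardA, hguardB, Bool.false_eq_true, if_false]
  rw [hk]
  simp only []
  rw [foldl_ignore_eq_filter ig (fun d => (PySem.Dict.ofList dl).getD d []) rest,
      foldl_inter_eq_filter (fun d => (PySem.Dict.ofList dl).getD d [])]
  have hpred : ∀ c,
      pvInAllSets ((rest.filter (fun d => !ig.contains d)).map
          (fun d => PySem.Set.ofList ((PySem.Dict.ofList dl).getD d []))) c
        = (rest.filter (fun d => !ig.contains d)).all
            (fun d => ((PySem.Dict.ofList dl).getD d []).contains c) := by
    intro c
    simp [pvInAllSets, List.all_map, Function.comp]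
  have hB : pvCollect ((PySem.Dict.ofList dl).getD d0 [])
        ((rest.filter (fun d => !ig.contains d)).map
          (fun d => PySem.Set.ofList ((PySem.Dict.ofList dl).getD d [])))
      = PySem.Set.ofList (((PySem.Dict.ofList dl).getD d0 []).filter
          (pvInAllSets ((rest.filter (fun d => !ig.contains d)).map
            (fun d => PySem.Set.ofList ((PySem.Dict.ofList dl).getD d []))))) := by
    unfold pvCollect
    rw [collect_eq_update]
    rfl
  rw [hB, List.filter_congr (fun c _ => hpred c)]
  exact filter_set_update
    (fun c => (rest.filter (fun d => !ig.contains d)).all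
      (fun d => ((PySem.Dict.ofList dl).getD d []).contains c))
    ((PySem.Dict.ofList dl).getD d0 []) []
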